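-- pv_equiv track=rewrite | github.com/remowxdx/AoC-2022 | aoc23.py | part2
-- ===== SOURCE A (Python) =====
-- def read_elves(data):
--     elves = []
--     for y, row in enumerate(data):
--         for x, char in enumerate(row):
--             if char == "#":
--                 elves.append((x, y))
--     return elves
--
-- DIRECTIONS = [
--     (-1, -1),
--     (0, -1),
--     (1, -1),
--     (-1, 0),
--     (0, 0),
--     (1, 0),
--     (-1, 1),
--     (0, 1),
--     (1, 1),
-- ]
--
-- def propose_direction(elves, elf, direction):
--     positions = [(elf[0] + dir_[0], elf[1] + dir_[1]) for dir_ in DIRECTIONS]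
--
--     if direction == "N":
--         dirs = [0, 1, 2]
--         proposal = positions[1]
--     elif direction == "S":
--         dirs = [6, 7, 8]
--         proposal = positions[7]
--     elif direction == "W":
--         dirs = [0, 3, 6]
--         proposal = positions[3]
--     elif direction == "E":
--         dirs = [2, 5, 8]
--         proposal = positions[5]
--     else:
--         dirs = [0, 1, 2, 3, 5, 6, 7, 8]
--         proposal = elf
--
--     for dir_ in dirs:
--         if positions[dir_] in elves:
--             break
--     else:
--         return proposal
--     return None
--
-- def first_half(elves, directions, phase):
--     proposals = {}
--     moved = False
--     for elf in elves:
--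
--         proposal = propose_direction(elves, elf, "C")
--         if proposal is not None:
--             proposals[proposal] = [elf]
--             continue
--
--         moved = True
--
--         current_phase = phase % 4
--         for _ in range(4):
--             proposal = propose_direction(elves, elf, directions[current_phase % 4])
--             if proposal is not None:
--                 if proposal not in proposals:
--                     proposals[proposal] = []
--                 proposals[proposal].append(elf)
--                 break
--             current_phase += 1
--         else:
--             if elf not in proposals:
--                 proposals[elf] = []
--             proposals[elf].append(elf)
--
--     return proposals, moved
--
-- def second_half(proposals):
--     elves = []
--     for destination, sources in proposals.items():
--         if len(sources) == 1:
--             elves.append(destination)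
--         else:
--             elves.extend(sources)
--     return elves
--
-- def part2(data):
--     elves = read_elves(data)
--     directions = ["N", "S", "W", "E"]
--     phase = 0
--     while True:
--         proposals, moved = first_half(elves, directions, phase)
--         elves = second_half(proposals)
--         phase += 1
--         if not moved:
--             break
--     return phase
-- ===== SOURCE B (Python) =====
-- # Head-on conflict detection instead of proposal counting: an elf's move can only be
-- # blocked by the single elf directly opposite its target (AoC-23 geometry: perpendicular
-- # movers into the same cell are impossible, and stayers occupy their own cell), so no
-- # proposal dict/counter is kept at all — each elf decides its move locally.
--
-- NEIGH = [(-1, -1), (0, -1), (1, -1), (-1, 0), (1, 0), (-1, 1), (0, 1), (1, 1)]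
-- RULES = [
--     ((0, -1), ((-1, -1), (0, -1), (1, -1))),   # N
--     ((0, 1), ((-1, 1), (0, 1), (1, 1))),       # S
--     ((-1, 0), ((-1, -1), (-1, 0), (-1, 1))),   # W
--     ((1, 0), ((1, -1), (1, 0), (1, 1))),       # E
-- ]
--
-- def part2(data):
--     elves = [(x, y) for y, row in enumerate(data) for x, c in enumerate(row) if c == "#"]
--     occ = set(elves)
--     phase = 0
--     while True:
--         quiet = True
--         nxt = []
--         for (x, y) in elves:
--             if all((x + dx, y + dy) not in occ for dx, dy in NEIGH):
--                 nxt.append((x, y))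
--                 continue
--             quiet = False
--             tx, ty = _target(occ, x, y, phase)
--             if (tx, ty) == (x, y):
--                 nxt.append((x, y))
--             elif (2 * tx - x, 2 * ty - y) in occ and \
--                     any((2 * tx - x + dx, 2 * ty - y + dy) in occ for dx, dy in NEIGH) and \
--                     _target(occ, 2 * tx - x, 2 * ty - y, phase) == (tx, ty):
--                 nxt.append((x, y))          # head-on collision: both stay
--             else:
--                 nxt.append((tx, ty))
--         elves = nxt
--         occ = set(elves)
--         phase += 1
--         if quiet:
--             return phase
--
-- def _target(occ, x, y, phase):
--     for k in range(4):
--         (dx, dy), side = RULES[(phase + k) % 4]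
--         if all((x + cx, y + cy) not in occ for cx, cy in side):
--             return (x + dx, y + dy)
--     return (x, y)
-- ===== Notes on version B (the rewrite author's own statement) =====
-- stated objective: alternative
-- what changed: B keeps no proposal table at all: instead of A's dict grouping every elf's proposal by destination and then resolving destinations globally in a second phase, B moves each elf locally in one pass, cancelling a move only when the single elf directly opposite the target cell (the only geometrically possible collider) is active and proposes the same cell.
import Mathlib
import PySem

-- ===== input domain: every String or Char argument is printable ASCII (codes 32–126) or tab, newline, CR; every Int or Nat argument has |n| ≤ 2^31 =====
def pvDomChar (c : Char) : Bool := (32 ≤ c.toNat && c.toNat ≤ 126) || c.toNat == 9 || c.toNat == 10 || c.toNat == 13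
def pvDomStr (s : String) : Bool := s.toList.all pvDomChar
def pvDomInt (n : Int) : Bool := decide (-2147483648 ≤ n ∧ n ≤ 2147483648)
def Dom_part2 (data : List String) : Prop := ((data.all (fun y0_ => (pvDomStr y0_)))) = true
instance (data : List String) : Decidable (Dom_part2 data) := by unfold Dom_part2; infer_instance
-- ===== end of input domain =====

-- B resolves each elf's move locally by checking only the single elf directly opposite
-- its target (the only possible collider on this grid), instead of A's global
-- proposal-dict grouping; the unbounded `while True` of both Pythons is ported with the
-- same large fuel bound (10^6 rounds) on both sides, returning the current round count
-- when the fuel runs out.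

-- ===== PORT A =====
abbrev PvPos : Type := Int × Int

def pvReadElves (data : List String) : List PvPos :=
  (PySem.List.enumerate data).foldl (fun elves yrow =>
    (PySem.List.enumerate yrow.2.toList).foldl (fun elves xc =>
      if xc.2 = '#' then elves ++ [(xc.1, yrow.1)] else elves) elves) []

def pvDIRECTIONS : List PvPos :=
  [(-1,-1),(0,-1),(1,-1),(-1,0),(0,0),(1,0),(-1,1),(0,1),(1,1)]

def pvProposeDirection (elves : List PvPos) (elf : PvPos) (direction : String) : Option PvPos :=
  let positions := pvDIRECTIONS.map (fun d => (elf.1 + d.1, elf.2 + d.2))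
  let dp : List Int × PvPos :=
    if direction = "N" then ([0,1,2], PySem.List.pyGetD positions 1 (0,0))
    else if direction = "S" then ([6,7,8], PySem.List.pyGetD positions 7 (0,0))
    else if direction = "W" then ([0,3,6], PySem.List.pyGetD positions 3 (0,0))
    else if direction = "E" then ([2,5,8], PySem.List.pyGetD positions 5 (0,0))
    else ([0,1,2,3,5,6,7,8], elf)
  if dp.1.any (fun i => elves.contains (PySem.List.pyGetD positions i (0,0))) then none
  else some dp.2

-- 'if proposal not in proposals: proposals[proposal] = []' followed by 'proposals[proposal].append(elf)'
def pvAppendProp (props : PySem.Dict PvPos (List PvPos)) (p : PvPos) (e : PvPos) :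
    PySem.Dict PvPos (List PvPos) :=
  let d1 := if props.contains p then props else props.insert p []
  d1.insert p (d1.getD p [] ++ [e])

-- the 'for _ in range(4): … break / else: …' loop of first_half
def pvTryDirs (elves : List PvPos) (elf : PvPos) (dirs : List String)
    (props : PySem.Dict PvPos (List PvPos)) : Int → Nat → PySem.Dict PvPos (List PvPos)
  | _, 0 => pvAppendProp props elf elf
  | cur, n+1 =>
    match pvProposeDirection elves elf (PySem.List.pyGetD dirs (PySem.Int.mod cur 4) "") with
    | some p => pvAppendProp props p elf
    | none => pvTryDirs elves elf dirs props (cur + 1) n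

def pvFirstHalfStep (elves : List PvPos) (phase : Int) (dirs : List String)
    (st : PySem.Dict PvPos (List PvPos) × Bool) (elf : PvPos) :
    PySem.Dict PvPos (List PvPos) × Bool :=
  match pvProposeDirection elves elf "C" with
  | some p => (st.1.insert p [elf], st.2)
  | none => (pvTryDirs elves elf dirs st.1 (PySem.Int.mod phase 4) 4, true)

def pvFirstHalf (elves : List PvPos) (dirs : List String) (phase : Int) :
    PySem.Dict PvPos (List PvPos) × Bool :=
  elves.foldl (pvFirstHalfStep elves phase dirs) (PySem.Dict.empty, false)

def pvSecondHalf (props : PySem.Dict PvPos (List PvPos)) : List PvPos :=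
  props.items.foldl (fun acc kv => if kv.2.length = 1 then acc ++ [kv.1] else acc ++ kv.2) []

def pvLoopA (elves : List PvPos) (dirs : List String) (phase : Int) : Nat → Int
  | 0 => phase
  | n+1 =>
    let r := pvFirstHalf elves dirs phase
    let elves' := pvSecondHalf r.1
    if r.2 then pvLoopA elves' dirs (phase + 1) n else phase + 1

def part2 (data : List String) : Int :=
  pvLoopA (pvReadElves data) ["N", "S", "W", "E"] 0 1000000

-- ===== PORT B =====
def pvNEIGH : List PvPos := [(-1,-1),(0,-1),(1,-1),(-1,0),(1,0),(-1,1),(0,1),(1,1)]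

def pvRULES : List (PvPos × List PvPos) :=
  [((0,-1), [(-1,-1),(0,-1),(1,-1)]),
   ((0,1), [(-1,1),(0,1),(1,1)]),
   ((-1,0), [(-1,-1),(-1,0),(-1,1)]),
   ((1,0), [(1,-1),(1,0),(1,1)])]

-- the 'for k in range(4): … return …' of Source B's _target
def pvTargetB (occ : PySem.Set PvPos) (phase x y : Int) : Nat → Int → PvPos
  | 0, _ => (x, y)
  | n+1, k =>
    let sc := PySem.List.pyGetD pvRULES (PySem.Int.mod (phase + k) 4) ((0,0), [])
    if sc.2.all (fun d => !(PySem.Set.contains occ (x + d.1, y + d.2))) then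
      (x + sc.1.1, y + sc.1.2)
    else pvTargetB occ phase x y n (k + 1)

-- one elf of Source B's round: local head-on conflict check, state (quiet, nxt)
def pvStepB (occ : PySem.Set PvPos) (phase : Int) (st : Bool × List PvPos) (e : PvPos) :
    Bool × List PvPos :=
  if pvNEIGH.all (fun d => !(PySem.Set.contains occ (e.1 + d.1, e.2 + d.2))) then
    (st.1, st.2 ++ [e])
  else
    let t := pvTargetB occ phase e.1 e.2 4 0
    if t = e then (false, st.2 ++ [e])
    else
      let o : PvPos := (2 * t.1 - e.1, 2 * t.2 - e.2)
      if PySem.Set.contains occ o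
          && pvNEIGH.any (fun d => PySem.Set.contains occ (o.1 + d.1, o.2 + d.2))
          && (pvTargetB occ phase o.1 o.2 4 0 == t) then
        (false, st.2 ++ [e])
      else (false, st.2 ++ [t])

def pvReadElvesB (data : List String) : List PvPos :=
  (PySem.List.enumerate data).flatMap (fun yrow =>
    (PySem.List.enumerate yrow.2.toList).filterMap (fun xc =>
      if xc.2 = '#' then some (xc.1, yrow.1) else none))

def pvLoopB (elves : List PvPos) (phase : Int) : Nat → Int
  | 0 => phase
  | n+1 =>
    let occ := PySem.Set.ofList elves
    let st := elves.foldl (pvStepB occ phase) (true, [])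
    if st.1 then phase + 1 else pvLoopB st.2 (phase + 1) n

def part2_alt (data : List String) : Int := pvLoopB (pvReadElvesB data) 0 1000000

-- ===== PRECONDITION & SPEC =====
def Spec_part2 (data : List String) (out : Int) : Prop := out = part2_alt data
instance (data : List String) (out : Int) : Decidable (Spec_part2 data out) := by unfold Spec_part2; infer_instance

-- ===== CLAIM (what is proved, stated in full; the proofs are below) =====
def Claim_equal_part2 : Prop := ∀ (data : List String), Dom_part2 data → Spec_part2 data (part2 data)

-- ===== LEMMAS AND PROOFS =====

-- canonical per-elf functions (proof-side only)
def cHasNbr (S : List PvPos) (e : PvPos) : Bool :=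
  pvNEIGH.any (fun d => S.contains (e.1 + d.1, e.2 + d.2))

def cDir (S : List PvPos) (e : PvPos) (i : Int) : Option PvPos :=
  let sc := PySem.List.pyGetD pvRULES i ((0,0), [])
  if sc.2.all (fun d => !(S.contains (e.1 + d.1, e.2 + d.2))) then
    some (e.1 + sc.1.1, e.2 + sc.1.2)
  else none

def cTry (S : List PvPos) (e : PvPos) : Nat → Int → PvPos
  | 0, _ => e
  | n+1, c =>
    match cDir S e (PySem.Int.mod c 4) with
    | some p => p
    | none => cTry S e n (c + 1)

def cG (S : List PvPos) (ph : Int) (e : PvPos) : PvPos :=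
  if cHasNbr S e then cTry S e 4 ph else e

def cMv (S : List PvPos) (ph : Int) (e : PvPos) : PvPos :=
  if (S.map (cG S ph)).count (cG S ph e) = 1 then cG S ph e else e

lemma pv_mod4_cases (c : Int) :
    PySem.Int.mod c 4 = 0 ∨ PySem.Int.mod c 4 = 1 ∨ PySem.Int.mod c 4 = 2 ∨ PySem.Int.mod c 4 = 3 := by
  have h1 : 0 ≤ PySem.Int.mod c 4 := PySem.Int.mod_nonneg c (by norm_num)
  have h2 : PySem.Int.mod c 4 < 4 := PySem.Int.mod_lt c (by norm_num)
  omega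

lemma pv_propose_C (S : List PvPos) (e : PvPos) :
    pvProposeDirection S e "C" = if cHasNbr S e then none else some e := by
  simp [pvProposeDirection, pvDIRECTIONS, cHasNbr, pvNEIGH,
    PySem.List.pyGetD, PySem.List.pyGet?, PySem.List.pyIdx?]

lemma pv_propose_N (S : List PvPos) (e : PvPos) : pvProposeDirection S e "N" = cDir S e 0 := by
  by_cases h1 : ((e.1 + -1, e.2 + -1) : PvPos) ∈ S <;>
  by_cases h2 : ((e.1, e.2 + -1) : PvPos) ∈ S <;>
  by_cases h3 : ((e.1 + 1, e.2 + -1) : PvPos) ∈ S <;>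
  simp [pvProposeDirection, pvDIRECTIONS, cDir, pvRULES,
    PySem.List.pyGetD, PySem.List.pyGet?, PySem.List.pyIdx?, h1, h2, h3]

lemma pv_propose_S (S : List PvPos) (e : PvPos) : pvProposeDirection S e "S" = cDir S e 1 := by
  by_cases h1 : ((e.1 + -1, e.2 + 1) : PvPos) ∈ S <;>
  by_cases h2 : ((e.1, e.2 + 1) : PvPos) ∈ S <;>
  by_cases h3 : ((e.1 + 1, e.2 + 1) : PvPos) ∈ S <;>
  simp [pvProposeDirection, pvDIRECTIONS, cDir, pvRULES,
    PySem.List.pyGetD, PySem.List.pyGet?, PySem.List.pyIdx?, h1, h2, h3]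

lemma pv_propose_W (S : List PvPos) (e : PvPos) : pvProposeDirection S e "W" = cDir S e 2 := by
  by_cases h1 : ((e.1 + -1, e.2 + -1) : PvPos) ∈ S <;>
  by_cases h2 : ((e.1 + -1, e.2) : PvPos) ∈ S <;>
  by_cases h3 : ((e.1 + -1, e.2 + 1) : PvPos) ∈ S <;>
  simp [pvProposeDirection, pvDIRECTIONS, cDir, pvRULES,
    PySem.List.pyGetD, PySem.List.pyGet?, PySem.List.pyIdx?, h1, h2, h3]

lemma pv_propose_E (S : List PvPos) (e : PvPos) : pvProposeDirection S e "E" = cDir S e 3 := by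
  by_cases h1 : ((e.1 + 1, e.2 + -1) : PvPos) ∈ S <;>
  by_cases h2 : ((e.1 + 1, e.2) : PvPos) ∈ S <;>
  by_cases h3 : ((e.1 + 1, e.2 + 1) : PvPos) ∈ S <;>
  simp [pvProposeDirection, pvDIRECTIONS, cDir, pvRULES,
    PySem.List.pyGetD, PySem.List.pyGet?, PySem.List.pyIdx?, h1, h2, h3]

lemma pv_propose_dir (S : List PvPos) (e : PvPos) (c : Int) :
    pvProposeDirection S e (PySem.List.pyGetD ["N","S","W","E"] (PySem.Int.mod c 4) "")
      = cDir S e (PySem.Int.mod c 4) := by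
  rcases pv_mod4_cases c with h | h | h | h <;> rw [h]
  · exact pv_propose_N S e
  · exact pv_propose_S S e
  · exact pv_propose_W S e
  · exact pv_propose_E S e

lemma pv_appendProp_eq (props : PySem.Dict PvPos (List PvPos)) (p e : PvPos) :
    pvAppendProp props p e = props.modify p [] (· ++ [e]) := by
  by_cases h : props.contains p = true
  · simp [pvAppendProp, PySem.Dict.modify, h]
  · have h' : props.contains p = false := by simpa using h
    simp [pvAppendProp, PySem.Dict.modify, h', PySem.Dict.getD_insert_self,
      PySem.Dict.insert_insert_self, PySem.Dict.getD_of_not_contains props ([] : List PvPos) h']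

lemma pv_tryDirs_eq (S : List PvPos) (e : PvPos) (props : PySem.Dict PvPos (List PvPos)) :
    ∀ (n : Nat) (c : Int),
      pvTryDirs S e ["N","S","W","E"] props c n = props.modify (cTry S e n c) [] (· ++ [e]) := by
  intro n
  induction n generalizing props with
  | zero => intro c; simp only [pvTryDirs, cTry, pv_appendProp_eq]
  | succ n ih =>
    intro c
    simp only [pvTryDirs, cTry, pv_propose_dir S e c]
    cases hd : cDir S e (PySem.Int.mod c 4) with
    | some p => simp [pv_appendProp_eq]
    | none => simp [ih]

lemma pv_cDir_not_mem (S : List PvPos) (e : PvPos) (i : Int) (p : PvPos)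
    (h0 : 0 ≤ i) (h4 : i < 4) (h : cDir S e i = some p) : S.contains p = false := by
  have hi : i = 0 ∨ i = 1 ∨ i = 2 ∨ i = 3 := by omega
  rcases hi with hm | hm | hm | hm <;> subst hm
  · have h' : (if (!(S.contains (e.1 + -1, e.2 + -1)) && (!(S.contains (e.1 + 0, e.2 + -1)) && (!(S.contains (e.1 + 1, e.2 + -1)) && true)))
        then some ((e.1 + 0, e.2 + -1) : PvPos) else none) = some p := h
    split at h'
    · rename_i hc
      simp only [Bool.and_eq_true, Bool.not_eq_true'] at hc
      cases h'
      exact hc.2.1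
    · cases h'
  · have h' : (if (!(S.contains (e.1 + -1, e.2 + 1)) && (!(S.contains (e.1 + 0, e.2 + 1)) && (!(S.contains (e.1 + 1, e.2 + 1)) && true)))
        then some ((e.1 + 0, e.2 + 1) : PvPos) else none) = some p := h
    split at h'
    · rename_i hc
      simp only [Bool.and_eq_true, Bool.not_eq_true'] at hc
      cases h'
      exact hc.2.1
    · cases h'
  · have h' : (if (!(S.contains (e.1 + -1, e.2 + -1)) && (!(S.contains (e.1 + -1, e.2 + 0)) && (!(S.contains (e.1 + -1, e.2 + 1)) && true)))
        then some ((e.1 + -1, e.2 + 0) : PvPos) else none) = some p := h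
    split at h'
    · rename_i hc
      simp only [Bool.and_eq_true, Bool.not_eq_true'] at hc
      cases h'
      exact hc.2.1
    · cases h'
  · have h' : (if (!(S.contains (e.1 + 1, e.2 + -1)) && (!(S.contains (e.1 + 1, e.2 + 0)) && (!(S.contains (e.1 + 1, e.2 + 1)) && true)))
        then some ((e.1 + 1, e.2 + 0) : PvPos) else none) = some p := h
    split at h'
    · rename_i hc
      simp only [Bool.and_eq_true, Bool.not_eq_true'] at hc
      cases h'
      exact hc.2.1
    · cases h'

-- cTry either stays or returns a cDir result at some direction index
lemma pv_cTry_cases (S : List PvPos) (e : PvPos) :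
    ∀ (n : Nat) (c : Int), cTry S e n c = e ∨
      ∃ i : Int, 0 ≤ i ∧ i < 4 ∧ cDir S e i = some (cTry S e n c) := by
  intro n
  induction n with
  | zero => intro c; left; rfl
  | succ n ih =>
    intro c
    have h1 : 0 ≤ PySem.Int.mod c 4 := PySem.Int.mod_nonneg c (by norm_num)
    have h2 : PySem.Int.mod c 4 < 4 := PySem.Int.mod_lt c (by norm_num)
    simp only [cTry]
    cases hd : cDir S e (PySem.Int.mod c 4) with
    | some p => exact Or.inr ⟨PySem.Int.mod c 4, h1, h2, hd⟩
    | none => exact ih (c + 1)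

lemma pv_cG_cases (S : List PvPos) (ph : Int) (e : PvPos) (h : cG S ph e ≠ e) :
    ∃ i : Int, 0 ≤ i ∧ i < 4 ∧ cDir S e i = some (cG S ph e) := by
  unfold cG at h ⊢
  by_cases hn : cHasNbr S e = true
  · rw [if_pos hn] at h ⊢
    rcases pv_cTry_cases S e 4 ph with he | hi
    · exact absurd he h
    · exact hi
  · rw [if_neg hn] at h
    exact absurd rfl h

lemma pv_cG_not_mem (S : List PvPos) (ph : Int) (e : PvPos) (h : cG S ph e ≠ e) :
    cG S ph e ∉ S := by
  obtain ⟨i, h0, h4, hd⟩ := pv_cG_cases S ph e h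
  have hc := pv_cDir_not_mem S e i _ h0 h4 hd
  intro hm
  rw [(List.contains_iff_mem).mpr hm] at hc
  cases hc

lemma pv_cG_factP (S : List PvPos) (ph : Int) (e : PvPos) (h : cG S ph e ∈ S) :
    cG S ph e = e := by
  by_cases he : cG S ph e = e
  · exact he
  · exact absurd h (pv_cG_not_mem S ph e he)

lemma pv_cTry_congrC (S : List PvPos) (e : PvPos) :
    ∀ (n : Nat) (c c' : Int), PySem.Int.mod c 4 = PySem.Int.mod c' 4 →
      cTry S e n c = cTry S e n c' := by
  intro n
  induction n with
  | zero => intro c c' _; rfl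
  | succ n ih =>
    intro c c' h
    simp only [cTry, h]
    cases hd : cDir S e (PySem.Int.mod c' 4) with
    | some p => rfl
    | none =>
      refine ih _ _ ?_
      have h4 : (0:Int) < 4 := by norm_num
      simp only [PySem.Int.mod_eq_emod_of_pos h4] at h ⊢
      omega

lemma pv_cTry_shift (S : List PvPos) (e : PvPos) (ph : Int) :
    cTry S e 4 (PySem.Int.mod ph 4) = cTry S e 4 ph := by
  refine pv_cTry_congrC S e 4 _ _ ?_
  have h4 : (0:Int) < 4 := by norm_num
  simp only [PySem.Int.mod_eq_emod_of_pos h4]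
  omega

lemma pv_auxFH (S : List PvPos) (ph : Int) :
    ∀ (l : List PvPos) (d : PySem.Dict PvPos (List PvPos)) (b : Bool),
      l.Nodup → (∀ e ∈ l, e ∈ S) → (∀ e ∈ l, d.contains e = false) →
      l.foldl (pvFirstHalfStep S ph ["N","S","W","E"]) (d, b)
        = (l.foldl (fun d e => d.modify (cG S ph e) [] (· ++ [e])) d,
           b || l.any (cHasNbr S)) := by
  intro l
  induction l with
  | nil => intro d b _ _ _; simp
  | cons e tl ih =>
    intro d b hnd hmem hdc
    have he : e ∈ e :: tl := by simp
    rw [List.foldl_cons, List.foldl_cons, List.any_cons]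
    have hstep : pvFirstHalfStep S ph ["N","S","W","E"] (d, b) e
        = (d.modify (cG S ph e) [] (· ++ [e]), b || cHasNbr S e) := by
      unfold pvFirstHalfStep
      rw [pv_propose_C]
      by_cases hn : cHasNbr S e = true
      · rw [if_pos hn]
        have hg : cG S ph e = cTry S e 4 ph := by rw [cG, if_pos hn]
        simp only [hn, Bool.or_true]
        rw [pv_tryDirs_eq, pv_cTry_shift, ← hg]
      · have hn' : cHasNbr S e = false := by simpa using hn
        rw [if_neg hn]
        have hg : cG S ph e = e := by rw [cG, if_neg hn]
        simp only [hn', Bool.or_false, hg]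
        unfold PySem.Dict.modify
        rw [PySem.Dict.getD_of_not_contains d ([] : List PvPos) (hdc e he)]
        simp
    rw [hstep]
    rw [ih (d.modify (cG S ph e) [] (· ++ [e])) (b || cHasNbr S e)
      (List.nodup_cons.mp hnd).2 (fun x hx => hmem x (List.mem_cons_of_mem _ hx)) ?_]
    · simp [Bool.or_assoc]
    · intro x hx
      rw [PySem.Dict.contains_modify]
      have hdx := hdc x (List.mem_cons_of_mem _ hx)
      have hxS : x ∈ S := hmem x (List.mem_cons_of_mem _ hx)
      have hne : x ≠ cG S ph e := by
        intro hxe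
        have hgs : cG S ph e ∈ S := hxe ▸ hxS
        have h2 := pv_cG_factP S ph e hgs
        rw [h2] at hxe
        exact (List.nodup_cons.mp hnd).1 (hxe ▸ hx)
      simp [hdx, hne]

lemma pv_movedA_eq (S : List PvPos) (ph : Int) (hnd : S.Nodup) :
    (pvFirstHalf S ["N","S","W","E"] ph).2 = S.any (cHasNbr S) := by
  unfold pvFirstHalf
  rw [pv_auxFH S ph S PySem.Dict.empty false hnd (fun _ h => h)
    (fun x _ => PySem.Dict.contains_empty x)]
  simp

lemma pv_filterMap_ite {α β : Type} (l : List α) (p : α → Prop) [DecidablePred p] (f : α → β) :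
    l.filterMap (fun x => if p x then some (f x) else none)
      = (l.filter (fun x => decide (p x))).map f := by
  induction l with
  | nil => rfl
  | cons x xs ih => by_cases h : p x <;> simp [h, ih]

lemma pv_flatMap_congr {α β : Type} (l : List α) (f g : α → List β)
    (h : ∀ x ∈ l, f x = g x) : l.flatMap f = l.flatMap g := by
  induction l with
  | nil => rfl
  | cons x xs ih =>
    rw [List.flatMap_cons, List.flatMap_cons, h x (by simp),
      ih (fun y hy => h y (by simp [hy]))]

lemma pv_nextA_eq (S : List PvPos) (ph : Int) (hnd : S.Nodup) :
    pvSecondHalf (pvFirstHalf S ["N","S","W","E"] ph).1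
      = (PySem.Set.ofList (S.map (cG S ph))).flatMap
          (fun t =>
            if (S.filter (fun e => cG S ph e == t)).length = 1 then [t]
            else S.filter (fun e => cG S ph e == t)) := by
  unfold pvFirstHalf
  rw [pv_auxFH S ph S PySem.Dict.empty false hnd (fun _ h => h)
    (fun x _ => PySem.Dict.contains_empty x)]
  have hD : (List.foldl (fun d e => d.modify (cG S ph e) [] (· ++ [e])) PySem.Dict.empty S)
      = List.foldl (fun d p => d.modify p.1 [] (· ++ [p.2])) PySem.Dict.empty
          (S.map (fun e => (cG S ph e, e))) := by
    rw [List.foldl_map]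
  have hkeys : (List.foldl (fun d p => d.modify p.1 [] (· ++ [p.2])) PySem.Dict.empty
      (S.map (fun e => (cG S ph e, e)))).keys = PySem.Set.ofList (S.map (cG S ph)) := by
    rw [PySem.Dict.keys_foldl_modify_key (S.map (fun e => (cG S ph e, e)))
      Prod.fst [] (fun _ p => (· ++ [p.2]))]
    simp only [PySem.Dict.keys_empty, PySem.Set.update_nil_left, List.map_map]
    rw [show (Prod.fst ∘ fun e => (cG S ph e, e)) = cG S ph from rfl]
  have hget : ∀ t, (List.foldl (fun d p => d.modify p.1 [] (· ++ [p.2])) PySem.Dict.empty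
      (S.map (fun e => (cG S ph e, e)))).getD t [] = S.filter (fun e => cG S ph e == t) := by
    intro t
    rw [PySem.Dict.getD_foldl_modify_append]
    simp only [PySem.Dict.getD_empty, List.nil_append, List.filter_map, List.map_map]
    rw [show ((fun (x : PvPos × PvPos) => x.2) ∘ fun e => (cG S ph e, e)) = fun e => e from rfl,
        show ((fun (p : PvPos × PvPos) => p.1 == t) ∘ fun e => (cG S ph e, e))
          = fun e => cG S ph e == t from rfl]
    simp
  have hnk : (List.foldl (fun d p => d.modify p.1 [] (· ++ [p.2])) PySem.Dict.empty
      (S.map (fun e => (cG S ph e, e)))).keys.Nodup := by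
    rw [hkeys]; exact PySem.Set.nodup_ofList _
  have hitems : (List.foldl (fun d p => d.modify p.1 [] (· ++ [p.2])) PySem.Dict.empty
      (S.map (fun e => (cG S ph e, e)))).items
      = (PySem.Set.ofList (S.map (cG S ph))).map
        (fun t => (t, S.filter (fun e => cG S ph e == t))) := by
    rw [PySem.Dict.items_eq_map_keys _ hnk [], hkeys]
    exact List.map_congr_left (fun t _ => by rw [hget t])
  show pvSecondHalf (List.foldl (fun d e => d.modify (cG S ph e) [] (· ++ [e]))
    PySem.Dict.empty S) = _
  rw [hD]
  unfold pvSecondHalf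
  rw [hitems, List.foldl_map]
  rw [PySem.List.foldl_congr_mem _ _
    (fun acc t => acc ++ (if (S.filter (fun e => cG S ph e == t)).length = 1 then [t]
      else S.filter (fun e => cG S ph e == t))) _
    (by intro acc t _; dsimp only; split <;> rfl)]
  rw [PySem.List.foldl_append_eq_flatMap]
  simp

lemma pv_count_flatMap_filter (S : List PvPos) (g : PvPos → PvPos) (x : PvPos) :
    ∀ keys : List PvPos,
      (keys.flatMap (fun t => S.filter (fun e => g e == t))).count x
        = keys.count (g x) * S.count x := by
  intro keys
  induction keys with
  | nil => simp
  | cons t ks ih =>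
    rw [List.flatMap_cons, List.count_append, ih, List.count_cons]
    by_cases h : g x = t
    · subst h
      rw [List.count_filter (by simp)]
      simp only [beq_self_eq_true, if_true]
      ring
    · have hx : x ∉ S.filter (fun e => g e == t) := by
        intro hx
        have h2 := (List.mem_filter.mp hx).2
        simp at h2
        exact h h2
      rw [List.count_eq_zero.mpr hx]
      have hne : (t == g x) = false := by
        simp only [beq_eq_false_iff_ne, ne_eq]
        exact fun h2 => h h2.symm
      simp [hne]

lemma pv_perm_partition (S : List PvPos) (g : PvPos → PvPos) (keys : List PvPos)
    (hk : keys.Nodup) (hm : ∀ e ∈ S, g e ∈ keys) :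
    (keys.flatMap (fun t => S.filter (fun e => g e == t))).Perm S := by
  rw [List.perm_iff_count]
  intro x
  rw [pv_count_flatMap_filter S g x keys]
  by_cases hx : x ∈ S
  · rw [List.count_eq_one_of_mem hk (hm x hx), one_mul]
  · rw [List.count_eq_zero.mpr hx]
    simp

lemma pv_count_map_eq_length_filter (S : List PvPos) (g : PvPos → PvPos) (t : PvPos) :
    (S.map g).count t = (S.filter (fun e => g e == t)).length := by
  rw [show (S.map g).count t = List.countP (fun e => g e == t) S from by
      simp [List.count, List.countP_map]; rfl,
    List.countP_eq_length_filter]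

lemma pv_nextA_perm (S : List PvPos) (ph : Int) (hnd : S.Nodup) :
    (pvSecondHalf (pvFirstHalf S ["N","S","W","E"] ph).1).Perm (S.map (cMv S ph)) := by
  rw [pv_nextA_eq S ph hnd]
  have hF : ∀ t ∈ PySem.Set.ofList (S.map (cG S ph)),
      (if (S.filter (fun e => cG S ph e == t)).length = 1 then [t]
       else S.filter (fun e => cG S ph e == t))
        = (S.filter (fun e => cG S ph e == t)).map (cMv S ph) := by
    intro t _
    by_cases h1 : (S.filter (fun e => cG S ph e == t)).length = 1
    · rw [if_pos h1]
      obtain ⟨e0, he0⟩ := List.length_eq_one_iff.mp h1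
      rw [he0]
      have he0m : e0 ∈ S.filter (fun e => cG S ph e == t) := by rw [he0]; simp
      have hg : cG S ph e0 = t := by simpa using (List.mem_filter.mp he0m).2
      have hc : (S.map (cG S ph)).count t = 1 := by
        rw [pv_count_map_eq_length_filter, h1]
      simp [cMv, hg, hc]
    · rw [if_neg h1]
      symm
      refine (List.map_congr_left ?_).trans (List.map_id _)
      intro e he
      have hg : cG S ph e = t := by simpa using (List.mem_filter.mp he).2
      have hne : (S.map (cG S ph)).count (cG S ph e) ≠ 1 := by
        rw [hg, pv_count_map_eq_length_filter]; exact h1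
      simp [cMv, hne]
  rw [pv_flatMap_congr _ _ _ hF, ← List.map_flatMap]
  refine List.Perm.map (cMv S ph) ?_
  refine pv_perm_partition S (cG S ph) _ (PySem.Set.nodup_ofList _) ?_
  intro e he
  rw [PySem.Set.mem_ofList]
  exact List.mem_map.mpr ⟨e, he, rfl⟩

lemma pv_two_le_length {α : Type} [BEq α] [LawfulBEq α] (l : List α) (a b : α)
    (ha : a ∈ l) (hb : b ∈ l) (hne : a ≠ b) : 2 ≤ l.length := by
  have hb' : b ∈ l.erase a := (List.mem_erase_of_ne (fun h => hne h.symm)).mpr hb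
  have h1 := List.length_erase_of_mem ha
  have h2 : 0 < (l.erase a).length := List.length_pos_of_mem hb'
  omega

lemma pv_nodup_map_mv (S : List PvPos) (ph : Int) (hnd : S.Nodup) :
    (S.map (cMv S ph)).Nodup := by
  refine List.Nodup.map_on ?_ hnd
  intro x hx y hy hxy
  unfold cMv at hxy
  split_ifs at hxy with hcx hcy hcy
  · by_contra hne
    have h2 : 2 ≤ (S.filter (fun e => cG S ph e == cG S ph x)).length := by
      refine pv_two_le_length _ x y (List.mem_filter.mpr ⟨hx, by simp⟩)
        (List.mem_filter.mpr ⟨hy, by simp [hxy]⟩) hne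
    rw [pv_count_map_eq_length_filter] at hcx
    omega
  · have hgs : cG S ph x ∈ S := hxy ▸ hy
    exact (pv_cG_factP S ph x hgs).symm.trans hxy
  · have hgs : cG S ph y ∈ S := hxy ▸ hx
    exact ((pv_cG_factP S ph y hgs).symm.trans hxy.symm).symm
  · exact hxy

lemma pv_contains_congr (LA LB : List PvPos) (hp : LA.Perm LB) :
    ∀ x : PvPos, LA.contains x = LB.contains x := by
  intro x
  have h1 : LA.contains x = true ↔ LB.contains x = true := by
    simp only [List.contains_iff_mem]
    exact hp.mem_iff
  cases hA : LA.contains x <;> cases hB : LB.contains x <;> simp_all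

lemma pv_ofList_contains (S : List PvPos) (x : PvPos) :
    PySem.Set.contains (PySem.Set.ofList S) x = S.contains x := by
  rw [PySem.Set.contains_eq_listContains]
  have h1 : List.contains (PySem.Set.ofList S) x = true ↔ S.contains x = true := by
    simp only [List.contains_iff_mem]
    exact PySem.Set.mem_ofList S x
  cases hA : List.contains (PySem.Set.ofList S) x <;> cases hB : S.contains x <;> simp_all

lemma pv_cHasNbr_congr (LA LB : List PvPos) (hp : LA.Perm LB) (e : PvPos) :
    cHasNbr LA e = cHasNbr LB e := by
  unfold cHasNbr
  exact PySem.List.any_congr_mem (fun d _ => pv_contains_congr LA LB hp _)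

lemma pv_cDir_congrS (LA LB : List PvPos) (hp : LA.Perm LB) (e : PvPos) (i : Int) :
    cDir LA e i = cDir LB e i := by
  have hS := pv_contains_congr LA LB hp
  simp only [cDir, hS]

lemma pv_cTry_congrS (LA LB : List PvPos) (hp : LA.Perm LB) (e : PvPos) :
    ∀ (n : Nat) (c : Int), cTry LA e n c = cTry LB e n c := by
  intro n
  induction n with
  | zero => intro c; rfl
  | succ n ih =>
    intro c
    simp only [cTry, pv_cDir_congrS LA LB hp]
    cases cDir LB e (PySem.Int.mod c 4) with
    | some p => rfl
    | none => exact ih (c+1)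

lemma pv_cG_congr (LA LB : List PvPos) (hp : LA.Perm LB) (ph : Int) (e : PvPos) :
    cG LA ph e = cG LB ph e := by
  unfold cG
  rw [pv_cHasNbr_congr LA LB hp, pv_cTry_congrS LA LB hp e 4 ph]

lemma pv_cMv_congr (LA LB : List PvPos) (hp : LA.Perm LB) (ph : Int) (e : PvPos) :
    cMv LA ph e = cMv LB ph e := by
  have hg : cG LA ph = cG LB ph := funext (pv_cG_congr LA LB hp ph)
  unfold cMv
  rw [hg, (hp.map (cG LB ph)).count_eq]

-- ===== B-side lemmas =====

lemma pv_targetB_eq_cTry (S : List PvPos) (ph x y : Int) :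
    ∀ (n : Nat) (k : Int),
      pvTargetB (PySem.Set.ofList S) ph x y n k = cTry S (x, y) n (ph + k) := by
  intro n
  induction n with
  | zero => intro k; rfl
  | succ n ih =>
    intro k
    simp only [pvTargetB, cTry, cDir, pv_ofList_contains]
    split
    · rfl
    · rw [ih (k+1), show ph + (k+1) = ph + k + 1 from by ring]

-- GEOMETRY: two distinct elves can only propose the same target cell head-on

lemma cDir_elim (S : List PvPos) (e t : PvPos) (i : Int) (step : PvPos) (side : List PvPos)
    (hrule : PySem.List.pyGetD pvRULES i ((0,0), ([] : List PvPos)) = (step, side))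
    (h : cDir S e i = some t) :
    t = (e.1 + step.1, e.2 + step.2) ∧ ∀ d ∈ side, ((e.1 + d.1, e.2 + d.2) : PvPos) ∉ S := by
  unfold cDir at h
  rw [hrule] at h
  dsimp only at h
  split at h
  · rename_i hc
    cases h
    refine ⟨rfl, ?_⟩
    intro d hd hmem
    have hb := List.all_eq_true.mp hc d hd
    simp only [Bool.not_eq_true'] at hb
    rw [List.contains_iff_mem.mpr hmem] at hb
    cases hb
  · cases h

lemma pv_geometry (S : List PvPos) (e1 e2 t : PvPos) (i j : Int)
    (he1 : e1 ∈ S) (he2 : e2 ∈ S)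
    (hi0 : 0 ≤ i) (hi4 : i < 4) (hj0 : 0 ≤ j) (hj4 : j < 4)
    (h1 : cDir S e1 i = some t) (h2 : cDir S e2 j = some t) (hne : e1 ≠ e2) :
    e2 = (2 * t.1 - e1.1, 2 * t.2 - e1.2) := by
  obtain ⟨x1, y1⟩ := e1
  obtain ⟨x2, y2⟩ := e2
  obtain ⟨tx, ty⟩ := t
  have hi : i = 0 ∨ i = 1 ∨ i = 2 ∨ i = 3 := by omega
  have hj : j = 0 ∨ j = 1 ∨ j = 2 ∨ j = 3 := by omega
  rcases hi with rfl | rfl | rfl | rfl <;> rcases hj with rfl | rfl | rfl | rfl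
  · obtain ⟨ht1, hnm1⟩ := cDir_elim S (x1,y1) (tx,ty) 0 (0,-1) [(-1,-1),(0,-1),(1,-1)] (by decide) h1
    obtain ⟨ht2, hnm2⟩ := cDir_elim S (x2,y2) (tx,ty) 0 (0,-1) [(-1,-1),(0,-1),(1,-1)] (by decide) h2
    simp only [Prod.mk.injEq] at ht1 ht2
    obtain ⟨hx1, hy1⟩ := ht1
    obtain ⟨hx2, hy2⟩ := ht2
    exact absurd (by simp only [Prod.mk.injEq]; omega) hne
  · obtain ⟨ht1, hnm1⟩ := cDir_elim S (x1,y1) (tx,ty) 0 (0,-1) [(-1,-1),(0,-1),(1,-1)] (by decide) h1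
    obtain ⟨ht2, hnm2⟩ := cDir_elim S (x2,y2) (tx,ty) 1 (0,1) [(-1,1),(0,1),(1,1)] (by decide) h2
    simp only [Prod.mk.injEq] at ht1 ht2
    obtain ⟨hx1, hy1⟩ := ht1
    obtain ⟨hx2, hy2⟩ := ht2
    simp only [Prod.mk.injEq]; omega
  · obtain ⟨ht1, hnm1⟩ := cDir_elim S (x1,y1) (tx,ty) 0 (0,-1) [(-1,-1),(0,-1),(1,-1)] (by decide) h1
    obtain ⟨ht2, hnm2⟩ := cDir_elim S (x2,y2) (tx,ty) 2 (-1,0) [(-1,-1),(-1,0),(-1,1)] (by decide) h2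
    simp only [Prod.mk.injEq] at ht1 ht2
    obtain ⟨hx1, hy1⟩ := ht1
    obtain ⟨hx2, hy2⟩ := ht2
    have hc := hnm2 (-1,1) (by decide)
    have hEq : ((x1,y1) : PvPos) = (x2 + -1, y2 + 1) := by
      simp only [Prod.mk.injEq]; omega
    exact absurd (hEq ▸ he1) hc
  · obtain ⟨ht1, hnm1⟩ := cDir_elim S (x1,y1) (tx,ty) 0 (0,-1) [(-1,-1),(0,-1),(1,-1)] (by decide) h1
    obtain ⟨ht2, hnm2⟩ := cDir_elim S (x2,y2) (tx,ty) 3 (1,0) [(1,-1),(1,0),(1,1)] (by decide) h2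
    simp only [Prod.mk.injEq] at ht1 ht2
    obtain ⟨hx1, hy1⟩ := ht1
    obtain ⟨hx2, hy2⟩ := ht2
    have hc := hnm2 (1,1) (by decide)
    have hEq : ((x1,y1) : PvPos) = (x2 + 1, y2 + 1) := by
      simp only [Prod.mk.injEq]; omega
    exact absurd (hEq ▸ he1) hc
  · obtain ⟨ht1, hnm1⟩ := cDir_elim S (x1,y1) (tx,ty) 1 (0,1) [(-1,1),(0,1),(1,1)] (by decide) h1
    obtain ⟨ht2, hnm2⟩ := cDir_elim S (x2,y2) (tx,ty) 0 (0,-1) [(-1,-1),(0,-1),(1,-1)] (by decide) h2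
    simp only [Prod.mk.injEq] at ht1 ht2
    obtain ⟨hx1, hy1⟩ := ht1
    obtain ⟨hx2, hy2⟩ := ht2
    simp only [Prod.mk.injEq]; omega
  · obtain ⟨ht1, hnm1⟩ := cDir_elim S (x1,y1) (tx,ty) 1 (0,1) [(-1,1),(0,1),(1,1)] (by decide) h1
    obtain ⟨ht2, hnm2⟩ := cDir_elim S (x2,y2) (tx,ty) 1 (0,1) [(-1,1),(0,1),(1,1)] (by decide) h2
    simp only [Prod.mk.injEq] at ht1 ht2
    obtain ⟨hx1, hy1⟩ := ht1
    obtain ⟨hx2, hy2⟩ := ht2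
    exact absurd (by simp only [Prod.mk.injEq]; omega) hne
  · obtain ⟨ht1, hnm1⟩ := cDir_elim S (x1,y1) (tx,ty) 1 (0,1) [(-1,1),(0,1),(1,1)] (by decide) h1
    obtain ⟨ht2, hnm2⟩ := cDir_elim S (x2,y2) (tx,ty) 2 (-1,0) [(-1,-1),(-1,0),(-1,1)] (by decide) h2
    simp only [Prod.mk.injEq] at ht1 ht2
    obtain ⟨hx1, hy1⟩ := ht1
    obtain ⟨hx2, hy2⟩ := ht2
    have hc := hnm2 (-1,-1) (by decide)
    have hEq : ((x1,y1) : PvPos) = (x2 + -1, y2 + -1) := by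
      simp only [Prod.mk.injEq]; omega
    exact absurd (hEq ▸ he1) hc
  · obtain ⟨ht1, hnm1⟩ := cDir_elim S (x1,y1) (tx,ty) 1 (0,1) [(-1,1),(0,1),(1,1)] (by decide) h1
    obtain ⟨ht2, hnm2⟩ := cDir_elim S (x2,y2) (tx,ty) 3 (1,0) [(1,-1),(1,0),(1,1)] (by decide) h2
    simp only [Prod.mk.injEq] at ht1 ht2
    obtain ⟨hx1, hy1⟩ := ht1
    obtain ⟨hx2, hy2⟩ := ht2
    have hc := hnm2 (1,-1) (by decide)
    have hEq : ((x1,y1) : PvPos) = (x2 + 1, y2 + -1) := by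
      simp only [Prod.mk.injEq]; omega
    exact absurd (hEq ▸ he1) hc
  · obtain ⟨ht1, hnm1⟩ := cDir_elim S (x1,y1) (tx,ty) 2 (-1,0) [(-1,-1),(-1,0),(-1,1)] (by decide) h1
    obtain ⟨ht2, hnm2⟩ := cDir_elim S (x2,y2) (tx,ty) 0 (0,-1) [(-1,-1),(0,-1),(1,-1)] (by decide) h2
    simp only [Prod.mk.injEq] at ht1 ht2
    obtain ⟨hx1, hy1⟩ := ht1
    obtain ⟨hx2, hy2⟩ := ht2
    have hc := hnm2 (1,-1) (by decide)
    have hEq : ((x1,y1) : PvPos) = (x2 + 1, y2 + -1) := by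
      simp only [Prod.mk.injEq]; omega
    exact absurd (hEq ▸ he1) hc
  · obtain ⟨ht1, hnm1⟩ := cDir_elim S (x1,y1) (tx,ty) 2 (-1,0) [(-1,-1),(-1,0),(-1,1)] (by decide) h1
    obtain ⟨ht2, hnm2⟩ := cDir_elim S (x2,y2) (tx,ty) 1 (0,1) [(-1,1),(0,1),(1,1)] (by decide) h2
    simp only [Prod.mk.injEq] at ht1 ht2
    obtain ⟨hx1, hy1⟩ := ht1
    obtain ⟨hx2, hy2⟩ := ht2
    have hc := hnm2 (1,1) (by decide)
    have hEq : ((x1,y1) : PvPos) = (x2 + 1, y2 + 1) := by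
      simp only [Prod.mk.injEq]; omega
    exact absurd (hEq ▸ he1) hc
  · obtain ⟨ht1, hnm1⟩ := cDir_elim S (x1,y1) (tx,ty) 2 (-1,0) [(-1,-1),(-1,0),(-1,1)] (by decide) h1
    obtain ⟨ht2, hnm2⟩ := cDir_elim S (x2,y2) (tx,ty) 2 (-1,0) [(-1,-1),(-1,0),(-1,1)] (by decide) h2
    simp only [Prod.mk.injEq] at ht1 ht2
    obtain ⟨hx1, hy1⟩ := ht1
    obtain ⟨hx2, hy2⟩ := ht2
    exact absurd (by simp only [Prod.mk.injEq]; omega) hne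
  · obtain ⟨ht1, hnm1⟩ := cDir_elim S (x1,y1) (tx,ty) 2 (-1,0) [(-1,-1),(-1,0),(-1,1)] (by decide) h1
    obtain ⟨ht2, hnm2⟩ := cDir_elim S (x2,y2) (tx,ty) 3 (1,0) [(1,-1),(1,0),(1,1)] (by decide) h2
    simp only [Prod.mk.injEq] at ht1 ht2
    obtain ⟨hx1, hy1⟩ := ht1
    obtain ⟨hx2, hy2⟩ := ht2
    simp only [Prod.mk.injEq]; omega
  · obtain ⟨ht1, hnm1⟩ := cDir_elim S (x1,y1) (tx,ty) 3 (1,0) [(1,-1),(1,0),(1,1)] (by decide) h1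
    obtain ⟨ht2, hnm2⟩ := cDir_elim S (x2,y2) (tx,ty) 0 (0,-1) [(-1,-1),(0,-1),(1,-1)] (by decide) h2
    simp only [Prod.mk.injEq] at ht1 ht2
    obtain ⟨hx1, hy1⟩ := ht1
    obtain ⟨hx2, hy2⟩ := ht2
    have hc := hnm2 (-1,-1) (by decide)
    have hEq : ((x1,y1) : PvPos) = (x2 + -1, y2 + -1) := by
      simp only [Prod.mk.injEq]; omega
    exact absurd (hEq ▸ he1) hc
  · obtain ⟨ht1, hnm1⟩ := cDir_elim S (x1,y1) (tx,ty) 3 (1,0) [(1,-1),(1,0),(1,1)] (by decide) h1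
    obtain ⟨ht2, hnm2⟩ := cDir_elim S (x2,y2) (tx,ty) 1 (0,1) [(-1,1),(0,1),(1,1)] (by decide) h2
    simp only [Prod.mk.injEq] at ht1 ht2
    obtain ⟨hx1, hy1⟩ := ht1
    obtain ⟨hx2, hy2⟩ := ht2
    have hc := hnm2 (-1,1) (by decide)
    have hEq : ((x1,y1) : PvPos) = (x2 + -1, y2 + 1) := by
      simp only [Prod.mk.injEq]; omega
    exact absurd (hEq ▸ he1) hc
  · obtain ⟨ht1, hnm1⟩ := cDir_elim S (x1,y1) (tx,ty) 3 (1,0) [(1,-1),(1,0),(1,1)] (by decide) h1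
    obtain ⟨ht2, hnm2⟩ := cDir_elim S (x2,y2) (tx,ty) 2 (-1,0) [(-1,-1),(-1,0),(-1,1)] (by decide) h2
    simp only [Prod.mk.injEq] at ht1 ht2
    obtain ⟨hx1, hy1⟩ := ht1
    obtain ⟨hx2, hy2⟩ := ht2
    simp only [Prod.mk.injEq]; omega
  · obtain ⟨ht1, hnm1⟩ := cDir_elim S (x1,y1) (tx,ty) 3 (1,0) [(1,-1),(1,0),(1,1)] (by decide) h1
    obtain ⟨ht2, hnm2⟩ := cDir_elim S (x2,y2) (tx,ty) 3 (1,0) [(1,-1),(1,0),(1,1)] (by decide) h2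
    simp only [Prod.mk.injEq] at ht1 ht2
    obtain ⟨hx1, hy1⟩ := ht1
    obtain ⟨hx2, hy2⟩ := ht2
    exact absurd (by simp only [Prod.mk.injEq]; omega) hne

lemma pv_exists_ne_of_two_le (l : List PvPos) (a : PvPos)
    (hnd : l.Nodup) (ha : a ∈ l) (h2 : 2 ≤ l.length) : ∃ b ∈ l, b ≠ a := by
  have hlen := List.length_erase_of_mem ha
  have hpos : 0 < (l.erase a).length := by omega
  obtain ⟨b, hb⟩ := List.exists_mem_of_length_pos hpos
  exact ⟨b, List.mem_of_mem_erase hb, ((List.Nodup.mem_erase_iff hnd).mp hb).1⟩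

lemma pv_count_one_of_stay (S : List PvPos) (ph : Int) (e : PvPos)
    (hnd : S.Nodup) (he : e ∈ S) (hg : cG S ph e = e) :
    (S.map (cG S ph)).count e = 1 := by
  rw [pv_count_map_eq_length_filter]
  have hfe : S.filter (fun e' => cG S ph e' == e) = S.filter (fun e' => e' == e) := by
    apply List.filter_congr
    intro e' _
    by_cases hg' : cG S ph e' = e'
    · rw [hg']
    · have hnm := pv_cG_not_mem S ph e' hg'
      have h1 : (cG S ph e' == e) = false := by
        simp only [beq_eq_false_iff_ne, ne_eq]
        intro hEq; exact hnm (hEq ▸ he)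
      have h2 : (e' == e) = false := by
        simp only [beq_eq_false_iff_ne, ne_eq]
        intro hEq; subst hEq; exact hg' hg
      rw [h1, h2]
  rw [hfe, ← List.countP_eq_length_filter]
  have hcp : List.countP (fun e' => e' == e) S = S.count e := rfl
  rw [hcp]
  exact List.count_eq_one_of_mem hnd he

lemma pv_count_one_iff_aux (S : List PvPos) (ph : Int) (e t : PvPos)
    (hnd : S.Nodup) (he : e ∈ S) (ht : cG S ph e = t) (hne : t ≠ e) :
    ((S.map (cG S ph)).count t = 1 ↔
      ¬((((2 * t.1 - e.1, 2 * t.2 - e.2) : PvPos) ∈ S ∧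
        cG S ph ((2 * t.1 - e.1, 2 * t.2 - e.2) : PvPos) = t))) := by
  have hgne : cG S ph e ≠ e := by rw [ht]; exact hne
  have htS : t ∉ S := ht ▸ pv_cG_not_mem S ph e hgne
  have hoe : ((2 * t.1 - e.1, 2 * t.2 - e.2) : PvPos) ≠ e := by
    intro h
    have h1 : 2 * t.1 - e.1 = e.1 := congrArg Prod.fst h
    have h2 : 2 * t.2 - e.2 = e.2 := congrArg Prod.snd h
    exact hne (Prod.ext_iff.mpr ⟨by omega, by omega⟩)
  rw [pv_count_map_eq_length_filter]
  have hef : e ∈ S.filter (fun e' => cG S ph e' == t) := List.mem_filter.mpr ⟨he, by simp [ht]⟩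
  constructor
  · rintro hL ⟨hoS, hgo⟩
    have hof : ((2 * t.1 - e.1, 2 * t.2 - e.2) : PvPos) ∈ S.filter (fun e' => cG S ph e' == t) :=
      List.mem_filter.mpr ⟨hoS, by simp [hgo]⟩
    have h2 := pv_two_le_length _ e _ hef hof (fun h => hoe h.symm)
    omega
  · intro hconf
    by_contra hL
    have hpos : 0 < (S.filter (fun e' => cG S ph e' == t)).length := List.length_pos_of_mem hef
    have h2 : 2 ≤ (S.filter (fun e' => cG S ph e' == t)).length := by omega
    obtain ⟨e', he'f, he'ne⟩ := pv_exists_ne_of_two_le _ e (hnd.filter _) hef h2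
    obtain ⟨he'S, hge'b⟩ := List.mem_filter.mp he'f
    have hge' : cG S ph e' = t := by simpa using hge'b
    have hgene' : cG S ph e' ≠ e' := by
      intro h; rw [h] at hge'; exact htS (hge' ▸ he'S)
    obtain ⟨i, hi0, hi4, hdi⟩ := pv_cG_cases S ph e hgne
    obtain ⟨j, hj0, hj4, hdj⟩ := pv_cG_cases S ph e' hgene'
    rw [ht] at hdi
    rw [hge'] at hdj
    have hgeom := pv_geometry S e e' t i j he he'S hi0 hi4 hj0 hj4 hdi hdj
      (fun h => he'ne h.symm)
    exact hconf ⟨hgeom ▸ he'S, hgeom ▸ hge'⟩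

lemma pv_stepB_eq (S : List PvPos) (ph : Int) (hnd : S.Nodup) (e : PvPos) (he : e ∈ S)
    (st : Bool × List PvPos) :
    pvStepB (PySem.Set.ofList S) ph st e
      = (st.1 && !cHasNbr S e, st.2 ++ [cMv S ph e]) := by
  have hnbr : (pvNEIGH.all fun d => !PySem.Set.contains (PySem.Set.ofList S) (e.1 + d.1, e.2 + d.2))
      = !cHasNbr S e := by
    unfold cHasNbr
    simp only [pv_ofList_contains, List.all_eq_not_any_not, Bool.not_not]
  have htgt : ∀ p : PvPos, pvTargetB (PySem.Set.ofList S) ph p.1 p.2 4 0 = cTry S p 4 ph := by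
    intro p; rw [pv_targetB_eq_cTry, add_zero, Prod.mk.eta]
  unfold pvStepB
  rw [hnbr]
  by_cases hn : cHasNbr S e = true
  · rw [hn]
    simp only [Bool.not_true, Bool.and_false, Bool.false_eq_true, if_false]
    have hg : cG S ph e = cTry S e 4 ph := by rw [cG, if_pos hn]
    rw [htgt e, ← hg]
    by_cases hte : cG S ph e = e
    · rw [if_pos hte]
      have hc1 := pv_count_one_of_stay S ph e hnd he hte
      have hmv : cMv S ph e = e := by
        unfold cMv; rw [hte, if_pos hc1]
      rw [hmv]
    · rw [if_neg hte]
      have hiff := pv_count_one_iff_aux S ph e (cG S ph e) hnd he rfl hte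
      have hcond : (PySem.Set.contains (PySem.Set.ofList S)
            (2 * (cG S ph e).1 - e.1, 2 * (cG S ph e).2 - e.2)
          && pvNEIGH.any (fun d => PySem.Set.contains (PySem.Set.ofList S)
              ((2 * (cG S ph e).1 - e.1, 2 * (cG S ph e).2 - e.2).1 + d.1,
               (2 * (cG S ph e).1 - e.1, 2 * (cG S ph e).2 - e.2).2 + d.2))
          && (pvTargetB (PySem.Set.ofList S) ph
              (2 * (cG S ph e).1 - e.1, 2 * (cG S ph e).2 - e.2).1
              (2 * (cG S ph e).1 - e.1, 2 * (cG S ph e).2 - e.2).2 4 0 == cG S ph e)) = true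
          ↔ (((2 * (cG S ph e).1 - e.1, 2 * (cG S ph e).2 - e.2) : PvPos) ∈ S ∧
             cG S ph ((2 * (cG S ph e).1 - e.1, 2 * (cG S ph e).2 - e.2) : PvPos) = cG S ph e) := by
        rw [htgt ((2 * (cG S ph e).1 - e.1, 2 * (cG S ph e).2 - e.2) : PvPos)]
        simp only [pv_ofList_contains, Bool.and_eq_true, beq_iff_eq, List.contains_iff_mem]
        constructor
        · rintro ⟨⟨hoS, hoNbr⟩, htry⟩
          have hoNbr' : cHasNbr S ((2 * (cG S ph e).1 - e.1, 2 * (cG S ph e).2 - e.2) : PvPos) = true := hoNbr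
          refine ⟨hoS, ?_⟩
          rw [cG, if_pos hoNbr']
          exact htry
        · rintro ⟨hoS, hgo⟩
          have hoNbr : cHasNbr S ((2 * (cG S ph e).1 - e.1, 2 * (cG S ph e).2 - e.2) : PvPos) = true := by
            by_contra hno
            have hno' : cHasNbr S ((2 * (cG S ph e).1 - e.1, 2 * (cG S ph e).2 - e.2) : PvPos) = false := by
              simpa using hno
            rw [cG, if_neg (by simp [hno'])] at hgo
            have htS : cG S ph e ∉ S := pv_cG_not_mem S ph e hte
            exact htS (hgo ▸ hoS)
          refine ⟨⟨hoS, hoNbr⟩, ?_⟩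
          rw [cG, if_pos hoNbr] at hgo
          exact hgo
      by_cases hc : (((2 * (cG S ph e).1 - e.1, 2 * (cG S ph e).2 - e.2) : PvPos) ∈ S ∧
             cG S ph ((2 * (cG S ph e).1 - e.1, 2 * (cG S ph e).2 - e.2) : PvPos) = cG S ph e)
      · rw [if_pos (hcond.mpr hc)]
        have hmv : cMv S ph e = e := by
          unfold cMv
          rw [if_neg (fun h1 => (hiff.mp h1) hc)]
        rw [hmv]
      · rw [if_neg (fun h => hc (hcond.mp h))]
        have hmv : cMv S ph e = cG S ph e := by
          unfold cMv
          rw [if_pos (hiff.mpr hc)]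
        rw [hmv]
  · have hn' : cHasNbr S e = false := by simpa using hn
    rw [hn']
    simp only [Bool.not_false, Bool.and_true, if_true]
    have hg : cG S ph e = e := by rw [cG, if_neg hn]
    have hc1 := pv_count_one_of_stay S ph e hnd he hg
    have hmv : cMv S ph e = e := by
      unfold cMv; rw [hg, if_pos hc1]
    rw [hmv]

lemma pv_foldB_eq (S : List PvPos) (ph : Int) (hnd : S.Nodup) :
    ∀ (l : List PvPos) (b : Bool) (acc : List PvPos), (∀ e ∈ l, e ∈ S) →
      l.foldl (pvStepB (PySem.Set.ofList S) ph) (b, acc)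
        = (b && l.all (fun e => !cHasNbr S e), acc ++ l.map (cMv S ph)) := by
  intro l
  induction l with
  | nil => intro b acc _; simp
  | cons e tl ih =>
    intro b acc hmem
    rw [List.foldl_cons, pv_stepB_eq S ph hnd e (hmem e (by simp)),
      ih _ _ (fun x hx => hmem x (List.mem_cons_of_mem _ hx))]
    simp [Bool.and_assoc]

lemma pv_loop_eq (n : Nat) :
    ∀ (LA LB : List PvPos) (ph : Int), LA.Perm LB → LA.Nodup →
      pvLoopA LA ["N","S","W","E"] ph n = pvLoopB LB ph n := by
  induction n with
  | zero => intro LA LB ph _ _; rfl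
  | succ n ih =>
    intro LA LB ph hp hnd
    have hndB : LB.Nodup := (hp.nodup_iff).mp hnd
    have hfold := pv_foldB_eq LB ph hndB LB true [] (fun _ h => h)
    have hquiet : (LB.foldl (pvStepB (PySem.Set.ofList LB) ph) (true, [])).1
        = !(pvFirstHalf LA ["N","S","W","E"] ph).2 := by
      rw [hfold, pv_movedA_eq LA ph hnd]
      show (true && LB.all (fun e => !cHasNbr LB e)) = !LA.any (cHasNbr LA)
      rw [Bool.true_and, List.all_eq_not_any_not]
      simp only [Bool.not_not]
      rw [PySem.List.any_congr_mem (fun e _ => (pv_cHasNbr_congr LA LB hp e).symm)]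
      rw [List.Perm.any_eq hp]
    have hperm : (pvSecondHalf (pvFirstHalf LA ["N","S","W","E"] ph).1).Perm
        (LB.foldl (pvStepB (PySem.Set.ofList LB) ph) (true, [])).2 := by
      rw [hfold]
      show (pvSecondHalf (pvFirstHalf LA ["N","S","W","E"] ph).1).Perm
        ([] ++ LB.map (cMv LB ph))
      rw [List.nil_append]
      refine (pv_nextA_perm LA ph hnd).trans ?_
      rw [List.map_congr_left (fun e (_ : e ∈ LA) => pv_cMv_congr LA LB hp ph e)]
      exact hp.map _
    have hndA' : (pvSecondHalf (pvFirstHalf LA ["N","S","W","E"] ph).1).Nodup := by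
      refine (List.Perm.nodup_iff (pv_nextA_perm LA ph hnd)).mpr ?_
      exact pv_nodup_map_mv LA ph hnd
    simp only [pvLoopA, pvLoopB]
    rw [hquiet]
    cases hb : (pvFirstHalf LA ["N","S","W","E"] ph).2
    · simp
    · simp only [Bool.not_true, if_true, Bool.false_eq_true, if_false]
      exact ih _ _ _ hperm hndA'

lemma pv_read_eq (data : List String) : pvReadElves data = pvReadElvesB data := by
  unfold pvReadElves pvReadElvesB
  rw [PySem.List.foldl_congr_mem _ _
    (fun acc yrow => acc ++ (PySem.List.enumerate yrow.2.toList).filterMap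
      (fun xc => if xc.2 = '#' then some (xc.1, yrow.1) else none)) _ ?_]
  · rw [PySem.List.foldl_append_eq_flatMap]; simp
  · intro acc yrow _
    dsimp only
    rw [PySem.List.foldl_append_ite (p := fun xc : Int × Char => xc.2 = '#')
      (f := fun xc : Int × Char => ((xc.1 : Int), yrow.1))]
    rw [pv_filterMap_ite]

lemma pv_row_nodup (y0 : Int) (cs : List Char) :
    ((PySem.List.enumerate cs).filterMap
      (fun xc => if xc.2 = '#' then some (xc.1, y0) else none)).Nodup := by
  rw [pv_filterMap_ite]
  have hn : ((PySem.List.enumerate cs (0:Int)).map (fun p => p.1)).Nodup := by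
    rw [PySem.List.map_fst_enumerate]
    exact PySem.List.nodup_pyRange_one _ _
  refine List.Nodup.map_on ?_ ?_
  · intro a ha b hb hab
    have h1 : a.1 = b.1 := congrArg (fun q : PvPos => q.1) hab
    exact List.inj_on_of_nodup_map hn (List.mem_of_mem_filter ha)
      (List.mem_of_mem_filter hb) h1
  · refine List.Pairwise.filter _ ?_
    refine (PySem.List.pairwise_lt_enumerate cs 0).imp ?_
    intro p q hlt heq
    rw [heq] at hlt
    exact lt_irrefl _ hlt

lemma pv_rows_nodup (rows : List (Int × String)) (h : rows.Pairwise (fun p q => p.1 ≠ q.1)) :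
    (rows.flatMap (fun yrow => (PySem.List.enumerate yrow.2.toList).filterMap
      (fun xc => if xc.2 = '#' then some (xc.1, yrow.1) else none))).Nodup := by
  induction rows with
  | nil => simp
  | cons r rs ih =>
    rw [List.flatMap_cons, List.nodup_append]
    obtain ⟨hr, htl⟩ := List.pairwise_cons.mp h
    refine ⟨pv_row_nodup r.1 r.2.toList, ih htl, ?_⟩
    intro a ha b hb
    have ha2 : a.2 = r.1 := by
      obtain ⟨xc, _, hxc⟩ := List.mem_filterMap.mp ha
      simp only [Option.ite_none_right_eq_some, Option.some.injEq] at hxc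
      exact (congrArg Prod.snd hxc.2).symm
    obtain ⟨q, hqrs, hbq⟩ := List.mem_flatMap.mp hb
    have hb2 : b.2 = q.1 := by
      obtain ⟨xc, _, hxc⟩ := List.mem_filterMap.mp hbq
      simp only [Option.ite_none_right_eq_some, Option.some.injEq] at hxc
      exact (congrArg Prod.snd hxc.2).symm
    intro hab
    exact hr q hqrs (by rw [← ha2, hab, hb2])

lemma pv_read_nodup (data : List String) : (pvReadElvesB data).Nodup := by
  unfold pvReadElvesB
  refine pv_rows_nodup _ ?_
  exact (PySem.List.pairwise_lt_enumerate data 0).imp (fun hlt => ne_of_lt hlt)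

-- ===== VERDICT (by name: the statement is the Claim_ definition above) =====
theorem part2_spec : Claim_equal_part2 := by
  intro data _
  unfold Spec_part2 part2 part2_alt
  rw [pv_read_eq]
  exact pv_loop_eq 1000000 _ _ 0 (List.Perm.refl _) (pv_read_nodup data)
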